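-- pv_equiv track=rewrite | github.com/MrBrantCode/unitest_baseline | mut_generate/mist_train_cf/cf_102513/solution.py | remove_non_repeating_elements
-- ===== SOURCE A (Python) =====
-- def remove_non_repeating_elements(arr):
--     """
--     This function takes an array of integers as input and returns a new array containing
--     the elements that occur more than once in the input array, while preserving their
--     original order.
--
--     Parameters:
--     arr (list): The input array of integers.
--
--     Returns:
--     list: A new array containing the elements that occur more than once in the input array.
--
--     Time Complexity: O(n)
--     Space Complexity: O(n)
--     """
--     count = {}
--     result = []
--
--     # Count the occurrences of each element in the input array
--     for num in arr:
--         if num in count: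
--             count[num] += 1
--         else:
--             count[num] = 1
--
--     # Append only the elements that occur more than once to the result array
--     for num in arr:
--         if count[num] > 1:
--             result.append(num)
--
--     return result
-- ===== SOURCE B (Python) =====
-- def remove_non_repeating_elements(arr):
--     # Sort-then-scan: sort a copy, collect values that appear in adjacent equal
--     # pairs of the sorted list (exactly the values occurring more than once),
--     # then keep the original elements that belong to that set.
--     s = sorted(arr)
--     dups = {a for a, b in zip(s, s[1:]) if a == b}
--     return [x for x in arr if x in dups]
-- ===== Notes on version B (the rewrite author's own statement) =====
-- stated objective: alternative
-- what changed: Replaced the frequency-dictionary algorithm with a sort-then-scan one: duplicated values are found as adjacent equal pairs of a sorted copy (no counting at all), and the original list is filtered by membership in that set.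
import Mathlib
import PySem

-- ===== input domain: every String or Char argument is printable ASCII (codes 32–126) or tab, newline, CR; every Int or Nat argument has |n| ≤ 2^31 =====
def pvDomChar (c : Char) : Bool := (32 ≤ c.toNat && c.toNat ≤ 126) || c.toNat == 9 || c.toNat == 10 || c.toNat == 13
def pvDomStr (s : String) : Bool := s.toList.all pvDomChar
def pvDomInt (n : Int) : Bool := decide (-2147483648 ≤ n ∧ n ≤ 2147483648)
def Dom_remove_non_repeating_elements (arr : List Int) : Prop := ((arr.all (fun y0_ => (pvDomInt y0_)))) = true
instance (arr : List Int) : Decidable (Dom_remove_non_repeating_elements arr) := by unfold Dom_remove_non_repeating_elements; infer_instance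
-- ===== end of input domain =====

-- B replaces A's frequency-dictionary algorithm with sort-then-scan: duplicated
-- values are the adjacent equal pairs of a sorted copy; same return value.

-- ===== PORT A =====
def remove_non_repeating_elements (arr : List Int) : List Int :=
  -- count = {}; for num in arr: if num in count: count[num] += 1 else: count[num] = 1
  let count : PySem.Dict Int Int :=
    arr.foldl (fun d num =>
      if d.contains num then d.insert num (d.getD num 0 + 1) else d.insert num 1)
      PySem.Dict.empty
  -- result = []; for num in arr: if count[num] > 1: result.append(num)
  -- (count[num] never raises: every num of arr is a key; getD 0 is exact here)
  arr.foldl (fun result num => if count.getD num 0 > 1 then result ++ [num] else result) []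

-- ===== PORT B =====
def remove_non_repeating_elements_alt (arr : List Int) : List Int :=
  -- s = sorted(arr)
  let s := PySem.List.sorted arr (fun x => x) false
  -- dups = {a for a, b in zip(s, s[1:]) if a == b}
  let dups : PySem.Set Int :=
    PySem.Set.ofList (((s.zip (PySem.List.slice s (some 1) none)).filter
      (fun p => p.1 == p.2)).map Prod.fst)
  -- [x for x in arr if x in dups]
  arr.filter (fun x => PySem.Set.contains dups x)

-- ===== PRECONDITION & SPEC =====
def Spec_remove_non_repeating_elements (arr : List Int) (out : List Int) : Prop := out = remove_non_repeating_elements_alt arr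
instance (arr : List Int) (out : List Int) : Decidable (Spec_remove_non_repeating_elements arr out) := by unfold Spec_remove_non_repeating_elements; infer_instance

-- ===== CLAIM (what is proved, stated in full; the proofs are below) =====
def Claim_equal_remove_non_repeating_elements : Prop := ∀ (arr : List Int), Dom_remove_non_repeating_elements arr → Spec_remove_non_repeating_elements arr (remove_non_repeating_elements arr)

-- ===== LEMMAS AND PROOFS =====
-- A's counting loop equals the uniform insert-(getD+1) loop (the else-branch
-- inserts 1 exactly when getD is 0), so its table reads back list counts.
theorem countDict_getD (arr : List Int) (v : Int) :
    (arr.foldl (fun d num =>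
      if d.contains num then d.insert num (d.getD num 0 + 1) else d.insert num 1)
      (PySem.Dict.empty : PySem.Dict Int Int)).getD v 0 = (arr.count v : Int) := by
  have hstep : (fun (d : PySem.Dict Int Int) num =>
      if d.contains num then d.insert num (d.getD num 0 + 1) else d.insert num 1)
      = (fun d num => d.insert num (d.getD num 0 + 1)) := by
    funext d num
    by_cases h : d.contains num = true
    · simp [h]
    · simp only [Bool.not_eq_true] at h
      rw [if_neg (by simp [h]), PySem.Dict.getD_of_not_contains (h := h)]; norm_num
  rw [hstep, PySem.Dict.getD_foldl_insert_add_one]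
  simp

-- On a (≤)-sorted list, a value heads an adjacent equal pair iff it occurs twice.
theorem mem_zip_tail_iff_two_le_count (l : List Int) (hp : l.Pairwise (· ≤ ·)) (x : Int) :
    (x, x) ∈ l.zip l.tail ↔ 2 ≤ l.count x := by
  induction l with
  | nil => simp
  | cons a t ih =>
    cases t with
    | nil =>
      simp only [List.tail_cons, List.zip_nil_right, List.not_mem_nil, false_iff, not_le,
        List.count_cons, List.count_nil]
      split <;> omega
    | cons b t' =>
      have hp' : (b :: t').Pairwise (· ≤ ·) := hp.sublist (List.sublist_cons_self a _)
      have hab : a ≤ b := (List.pairwise_cons.mp hp).1 b (by simp)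
      have ih' := ih hp'
      simp only [List.tail_cons, List.zip_cons_cons, List.mem_cons] at *
      by_cases hxa : x = a
      · subst hxa
        by_cases hxb : x = b
        · subst hxb
          constructor
          · intro _
            have h1 : 1 ≤ (x :: t').count x := List.count_pos_iff.mpr (by simp)
            rw [List.count_cons_self]
            omega
          · intro _; left; rfl
        · -- x = a ≠ b; since sorted, x does not occur in b :: t'
          have hnot : x ∉ b :: t' := by
            intro hmem
            rcases List.mem_cons.mp hmem with h | h
            · exact hxb h
            · have hbx : b ≤ x := (List.pairwise_cons.mp hp').1 x h
              exact hxb (le_antisymm hab hbx)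
          have hc0 : (b :: t').count x = 0 := List.count_eq_zero.mpr hnot
          constructor
          · rintro (h | h)
            · exact absurd (congrArg Prod.snd h) (by simpa using hxb)
            · exact absurd (List.of_mem_zip h).1 hnot
          · intro h
            rw [List.count_cons, hc0] at h
            exfalso; split at h <;> omega
      · -- x ≠ a: drop the head on both sides
        have hhd : ((x, x) = (a, b)) ↔ False :=
          ⟨fun h => hxa (congrArg Prod.fst h), False.elim⟩
        rw [hhd, false_or, ih']
        have : a ≠ x := fun h => hxa h.symm
        simp [List.count_cons, this]

-- Membership in B's dup set is "count in arr ≥ 2".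
theorem mem_dups_iff (arr : List Int) (x : Int) :
    x ∈ PySem.Set.ofList ((((PySem.List.sorted arr (fun x => x) false).zip
        (PySem.List.slice (PySem.List.sorted arr (fun x => x) false) (some 1) none)).filter
        (fun p => p.1 == p.2)).map Prod.fst) ↔ 2 ≤ arr.count x := by
  set s := PySem.List.sorted arr (fun x => x) false with hs
  rw [PySem.Set.mem_ofList, PySem.List.slice_from_one]
  have hsort : s.Pairwise (· ≤ ·) := by
    have := PySem.List.sorted_pairwise arr (fun x => x) (κ := Int)
    simpa [hs] using this
  have hcnt : s.count x = arr.count x :=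
    (PySem.List.sorted_perm arr (fun x => x) false).count_eq x
  rw [← hcnt, ← mem_zip_tail_iff_two_le_count s hsort x]
  constructor
  · intro h
    rcases List.mem_map.mp h with ⟨p, hpmem, hpfst⟩
    rcases List.mem_filter.mp hpmem with ⟨hpz, hpeq⟩
    have : p.1 = p.2 := by simpa using hpeq
    have hpx : p = (x, x) := by
      cases p with
      | mk u v => simp at hpfst this; subst hpfst; simp [this]
    exact hpx ▸ hpz
  · intro h
    exact List.mem_map.mpr ⟨(x, x), List.mem_filter.mpr ⟨h, by simp⟩, rfl⟩

-- ===== VERDICT (by name: the statement is the Claim_ definition above) =====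
theorem remove_non_repeating_elements_spec : Claim_equal_remove_non_repeating_elements := by
  intro arr _
  unfold Spec_remove_non_repeating_elements remove_non_repeating_elements
    remove_non_repeating_elements_alt
  rw [PySem.List.foldl_append_ite_eq_filter]
  refine List.filter_congr ?_
  intro x _
  rw [countDict_getD]
  have hd := mem_dups_iff arr x
  rw [← PySem.Set.contains_iff] at hd
  rw [Bool.eq_iff_iff]
  simp only [decide_eq_true_eq, hd]
  omega
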